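-- pv_equiv track=rewrite | github.com/panchocosil/aquapy | aquapy/cluster.py | cluster_phashes
-- ===== SOURCE A (Python) =====
-- from typing import List, Dict, Tuple
--
-- def _hex_to_bits(h: str) -> int:
--     return int(h, 16)
--
-- def hamming(a_hex: str, b_hex: str) -> int:
--     try:
--         return (_hex_to_bits(a_hex) ^ _hex_to_bits(b_hex)).bit_count()
--     except Exception:
--         return 64
--
-- def cluster_phashes(items: List[Tuple[int, str]], threshold: int = 10) -> Dict[int, int]:
--     parent = {i:i for i,_ in items}
--     def find(x):
--         while parent[x] != x:
--             parent[x] = parent[parent[x]]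
--             x = parent[x]
--         return x
--     def union(a,b):
--         ra, rb = find(a), find(b)
--         if ra != rb: parent[rb] = ra
--     for i in range(len(items)):
--         for j in range(i+1, len(items)):
--             ei, hi = items[i]; ej, hj = items[j]
--             if hi and hj and hamming(hi, hj) <= threshold:
--                 union(ei, ej)
--     roots = {}; next_id = 1; out = {}
--     for idx,_ in items:
--         r = find(idx)
--         if r not in roots:
--             roots[r] = next_id; next_id += 1
--         out[idx] = roots[r]
--     return out
-- ===== SOURCE B (Python) =====
-- # B: parse each hex hash once up front (A re-parses in every pair), then label
-- # components with a flat root map rewritten on merge -- no union-find forest.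
-- from typing import List, Dict, Tuple
--
-- def _parse16(h: str):
--     try:
--         return int(h, 16)
--     except ValueError:
--         return None
--
-- def cluster_phashes(items: List[Tuple[int, str]], threshold: int = 10) -> Dict[int, int]:
--     pre = [(e, bool(h), _parse16(h) if h else None) for e, h in items]
--     root = {e: e for e, _, _ in pre}
--     n = len(pre)
--     for i in range(n):
--         ei, bi, pi = pre[i]
--         for j in range(i + 1, n):
--             ej, bj, pj = pre[j]
--             if bi and bj:
--                 d = 64 if (pi is None or pj is None) else (pi ^ pj).bit_count()
--                 if d <= threshold:
--                     ra, rb = root[ei], root[ej]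
--                     if ra != rb:
--                         root = {k: (ra if v == rb else v) for k, v in root.items()}
--     label = {}
--     out = {}
--     nxt = 1
--     for idx, _ in items:
--         r = root[idx]
--         if r not in label:
--             label[r] = nxt
--             nxt += 1
--         out[idx] = label[r]
--     return out
-- ===== Notes on version B (the rewrite author's own statement) =====
-- stated objective: faster
-- what changed: B parses each hex hash with int(h,16) once up front (A re-parses both hashes inside every one of the n^2/2 pair checks) and replaces the path-compressing union-find with a flat id->root map that is rewritten wholesale on each merge, then labels components from that map.
import Mathlib
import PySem

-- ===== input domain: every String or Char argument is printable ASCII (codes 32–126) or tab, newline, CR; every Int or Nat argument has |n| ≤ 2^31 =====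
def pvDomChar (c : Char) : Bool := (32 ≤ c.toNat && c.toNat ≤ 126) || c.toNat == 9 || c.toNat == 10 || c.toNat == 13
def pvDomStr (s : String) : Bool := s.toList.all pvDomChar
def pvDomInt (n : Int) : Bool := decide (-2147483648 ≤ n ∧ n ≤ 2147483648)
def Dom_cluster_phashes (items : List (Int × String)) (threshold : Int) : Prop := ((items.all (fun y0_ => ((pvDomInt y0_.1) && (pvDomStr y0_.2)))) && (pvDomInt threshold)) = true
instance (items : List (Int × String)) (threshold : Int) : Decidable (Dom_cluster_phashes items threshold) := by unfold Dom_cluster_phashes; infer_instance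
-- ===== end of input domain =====

-- B parses each hex hash once up front and labels components with a flat root map
-- rewritten on merge (no union-find forest); measurably faster by a constant factor.
-- ===== PORT A =====
def hexToBits? (h : String) : Option Int := PySem.Int.ofStrBase? h 16

def hammingA (a b : String) : Int :=
  match hexToBits? a, hexToBits? b with
  | some x, some y => (PySem.Int.bitCount (PySem.Int.bxor x y) : Int)
  | _, _ => 64

def findLoop : Nat → PySem.Dict Int Int → Int → PySem.Dict Int Int × Int
  | 0, d, x => (d, x)
  | n+1, d, x =>
    let px := d.getD x 0
    if px ≠ x then
      let g := d.getD px 0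
      findLoop n (d.insert x g) g
    else (d, x)

def findA (d : PySem.Dict Int Int) (x : Int) : PySem.Dict Int Int × Int :=
  findLoop (d.items.length + 1) d x

def unionA (d : PySem.Dict Int Int) (a b : Int) : PySem.Dict Int Int :=
  let s1 := findA d a
  let s2 := findA s1.1 b
  if s1.2 ≠ s2.2 then s2.1.insert s2.2 s1.2 else s2.1

def cluster_phashes (items : List (Int × String)) (threshold : Int) : List (Int × Int) :=
  let parent0 : PySem.Dict Int Int := items.foldl (fun d p => d.insert p.1 p.1) PySem.Dict.empty
  let n : Int := PySem.List.len items
  let parent := (PySem.List.pyRange 0 n 1).foldl (fun d i =>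
    (PySem.List.pyRange (i+1) n 1).foldl (fun d j =>
      match PySem.List.pyGet? items i, PySem.List.pyGet? items j with
      | some (ei, hi), some (ej, hj) =>
        if hi ≠ "" ∧ hj ≠ "" ∧ hammingA hi hj ≤ threshold then unionA d ei ej else d
      | _, _ => d) d) parent0
  let st := items.foldl
    (fun (s : PySem.Dict Int Int × PySem.Dict Int Int × Int × PySem.Dict Int Int) p =>
      let f := findA s.1 p.1
      let roots' := if s.2.1.contains f.2 then s.2.1 else s.2.1.insert f.2 s.2.2.1
      let nid' := if s.2.1.contains f.2 then s.2.2.1 else s.2.2.1 + 1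
      (f.1, roots', nid', s.2.2.2.insert p.1 (roots'.getD f.2 0)))
    (parent, PySem.Dict.empty, 1, PySem.Dict.empty)
  st.2.2.2.items

-- ===== PORT B =====
def distB (pi pj : Option Int) : Int :=
  match pi, pj with
  | some x, some y => (PySem.Int.bitCount (PySem.Int.bxor x y) : Int)
  | _, _ => 64

def relabel (root : PySem.Dict Int Int) (ra rb : Int) : PySem.Dict Int Int :=
  PySem.Dict.mk (root.items.map (fun p => (p.1, if p.2 = rb then ra else p.2)))

def cluster_phashes_alt (items : List (Int × String)) (threshold : Int) : List (Int × Int) :=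
  let pre : List (Int × Bool × Option Int) :=
    items.map (fun p => (p.1, decide (p.2 ≠ ""), if p.2 ≠ "" then hexToBits? p.2 else none))
  let root0 : PySem.Dict Int Int := pre.foldl (fun d t => d.insert t.1 t.1) PySem.Dict.empty
  let n : Int := PySem.List.len pre
  let root := (PySem.List.pyRange 0 n 1).foldl (fun d i =>
    match PySem.List.pyGet? pre i with
    | some (ei, bi, pi) =>
      (PySem.List.pyRange (i+1) n 1).foldl (fun d j =>
        match PySem.List.pyGet? pre j with
        | some (ej, bj, pj) =>
          if bi && bj then
            if distB pi pj ≤ threshold then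
              let ra := d.getD ei 0
              let rb := d.getD ej 0
              if ra ≠ rb then relabel d ra rb else d
            else d
          else d
        | none => d) d
    | none => d) root0
  let st := items.foldl
    (fun (s : PySem.Dict Int Int × Int × PySem.Dict Int Int) p =>
      let r := root.getD p.1 0
      let label' := if s.1.contains r then s.1 else s.1.insert r s.2.1
      let nid' := if s.1.contains r then s.2.1 else s.2.1 + 1
      (label', nid', s.2.2.insert p.1 (label'.getD r 0)))
    (PySem.Dict.empty, 1, PySem.Dict.empty)
  st.2.2.items

-- ===== PRECONDITION & SPEC =====
def Spec_cluster_phashes (items : List (Int × String)) (threshold : Int) (out : List (Int × Int)) : Prop := out = cluster_phashes_alt items threshold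
instance (items : List (Int × String)) (threshold : Int) (out : List (Int × Int)) : Decidable (Spec_cluster_phashes items threshold out) := by unfold Spec_cluster_phashes; infer_instance

-- ===== CLAIM (what is proved, stated in full; the proofs are below) =====
def Claim_equal_cluster_phashes : Prop := ∀ (items : List (Int × String)) (threshold : Int), Dom_cluster_phashes items threshold → Spec_cluster_phashes items threshold (cluster_phashes items threshold)

-- ===== LEMMAS AND PROOFS =====
inductive UFPath (d : PySem.Dict Int Int) : Int → Int → List Int → Prop
  | root (r : Int) (h : d.get? r = some r) : UFPath d r r [r]
  | step (x y r : Int) (p : List Int) (h : d.get? x = some y) (hne : x ≠ y)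
      (hp : UFPath d y r p) : UFPath d x r (x :: p)

theorem ufpath_head_lookup {d : PySem.Dict Int Int} {x r : Int} {q : List Int}
    (h : UFPath d x r q) : ∃ v, d.get? x = some v := by
  cases h with
  | root _ hr => exact ⟨_, hr⟩
  | step _ y _ p h hne hp => exact ⟨y, h⟩

theorem ufpath_last {d : PySem.Dict Int Int} {x r : Int} {q : List Int}
    (h : UFPath d x r q) : d.get? r = some r := by
  induction h with
  | root r h => exact h
  | step _ _ _ _ _ _ _ ih => exact ih

theorem ufpath_nonnil {d : PySem.Dict Int Int} {x r : Int} {q : List Int}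
    (h : UFPath d x r q) : q ≠ [] ∧ 1 ≤ q.length := by
  cases h <;> simp

theorem ufpath_mem_keys {d : PySem.Dict Int Int} {x r : Int} {q : List Int}
    (h : UFPath d x r q) : ∀ z ∈ q, z ∈ d.keys := by
  induction h with
  | root r hr =>
    intro z hz
    rw [List.mem_singleton] at hz; subst hz
    have : ¬ d.get? z = none := by simp [hr]
    rw [PySem.Dict.get?_eq_none_iff_not_mem_keys] at this
    exact not_not.mp this
  | step x y r p hy hne hp ih =>
    intro z hz
    rcases List.mem_cons.mp hz with h1 | h2
    · subst h1
      have : ¬ d.get? z = none := by simp [hy]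
      rw [PySem.Dict.get?_eq_none_iff_not_mem_keys] at this
      exact not_not.mp this
    · exact ih z h2

theorem ufpath_start_mem {d : PySem.Dict Int Int} {x r : Int} {q : List Int}
    (h : UFPath d x r q) : x ∈ q := by
  cases h <;> simp

theorem ufpath_compress {d : PySem.Dict Int Int} {x px g : Int}
    (hx : d.get? x = some px) (hpx : px ≠ x) (hg : d.get? px = some g) :
    ∀ (n : Nat) (y r : Int) (q : List Int), q.length ≤ n → UFPath d y r q → q.Nodup →
    ∃ q', UFPath (d.insert x g) y r q' ∧ q'.Nodup ∧ q' ⊆ q := by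
  intro n
  induction n with
  | zero =>
    intro y r q hlen hp _
    have := (ufpath_nonnil hp).2; omega
  | succ n ih =>
    intro y r q hlen hp hnd
    by_cases hyx : y = x
    · subst hyx
      -- (after subst the variable is named y; d.get? y = some px)
      cases hp with
      | root _ hr => rw [hr] at hx; cases hx; exact absurd rfl hpx
      | step _ y2 _ p hy2 hne hp2 =>
        rw [hx] at hy2; cases hy2
        cases hp2 with
        | root _ hr =>
          rw [hr] at hg; cases hg
          refine ⟨[y, px], ?_, ?_, ?_⟩
          · refine UFPath.step _ _ _ _ (PySem.Dict.get?_insert_self d y px) hne ?_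
            exact UFPath.root _ (by rw [PySem.Dict.get?_insert_of_ne d px hpx]; exact hr)
          · simp [hne]
          · intro z hz; simpa using hz
        | step _ z2 _ p2 hz2 hne2 hp3 =>
          rw [hz2] at hg; cases hg
          have hnd' : y ∉ px :: p2 ∧ px ∉ p2 ∧ p2.Nodup := by
            rw [List.nodup_cons, List.nodup_cons] at hnd; exact hnd
          obtain ⟨q2, hq2, hq2nd, hq2sub⟩ := ih g r p2 (by simp at hlen ⊢; omega) hp3
            hnd'.2.2
          have hyg : y ≠ g := by
            intro hcon
            exact hnd'.1 (hcon ▸ List.mem_cons_of_mem _ (ufpath_start_mem hp3))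
          refine ⟨y :: q2, ?_, ?_, ?_⟩
          · exact UFPath.step _ _ _ _ (PySem.Dict.get?_insert_self d y g) hyg hq2
          · refine List.nodup_cons.mpr ⟨fun hmem => ?_, hq2nd⟩
            exact hnd'.1 (List.mem_cons_of_mem _ (hq2sub hmem))
          · intro z hz
            rcases List.mem_cons.mp hz with h1 | h1
            · subst h1; exact List.mem_cons_self
            · exact List.mem_cons_of_mem _ (List.mem_cons_of_mem _ (hq2sub h1))
    · cases hp with
      | root _ hr =>
        exact ⟨[y], UFPath.root _ (by rw [PySem.Dict.get?_insert_of_ne d g hyx]; exact hr),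
          List.nodup_singleton _, by intro z hz; exact hz⟩
      | step _ y2 _ p hy2 hne hp2 =>
        obtain ⟨q2, hq2, hq2nd, hq2sub⟩ := ih y2 r p (by simp at hlen; omega) hp2
          (List.nodup_cons.mp hnd).2
        refine ⟨y :: q2, ?_, ?_, ?_⟩
        · exact UFPath.step _ _ _ _ (by rw [PySem.Dict.get?_insert_of_ne d g hyx]; exact hy2) hne hq2
        · exact List.nodup_cons.mpr ⟨fun hmem => (List.nodup_cons.mp hnd).1 (hq2sub hmem), hq2nd⟩
        · intro z hz
          rcases List.mem_cons.mp hz with h1 | h1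
          · subst h1; exact List.mem_cons_self
          · exact List.mem_cons_of_mem _ (hq2sub h1)

theorem ufpath_next {d : PySem.Dict Int Int} {y r g : Int} {q : List Int}
    (h : UFPath d y r q) (hg : d.get? y = some g) (hnd : q.Nodup) :
    ∃ pg, UFPath d g r pg ∧ pg.Nodup ∧ pg ⊆ q ∧ pg.length + 1 ≤ q.length + 1 := by
  cases h with
  | root _ hr =>
    rw [hr] at hg
    cases hg
    exact ⟨[y], UFPath.root _ hr, List.nodup_singleton _, fun z hz => hz, by simp⟩
  | step _ y2 _ p hy2 hne hp2 =>
    rw [hy2] at hg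
    cases hg
    exact ⟨p, hp2, (List.nodup_cons.mp hnd).2, fun z hz => List.mem_cons_of_mem _ hz, by simp⟩

theorem findLoop_spec :
    ∀ (fuel : Nat) (d : PySem.Dict Int Int) (x r : Int) (q : List Int),
    UFPath d x r q → q.Nodup → q.length ≤ fuel →
    (findLoop fuel d x).2 = r ∧ (findLoop fuel d x).1.keys = d.keys ∧
    (∀ y r' q', UFPath d y r' q' → q'.Nodup →
      ∃ q'', UFPath (findLoop fuel d x).1 y r' q'' ∧ q''.Nodup ∧ q'' ⊆ q') := by
  intro fuel
  induction fuel with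
  | zero =>
    intro d x r q hp hnd hlen
    have := (ufpath_nonnil hp).2; omega
  | succ n ih =>
    intro d x r q hp hnd hlen
    cases hp with
    | root _ hr =>
      have hgd : d.getD x 0 = x := PySem.Dict.getD_of_get?_eq_some d 0 hr
      have hfl : findLoop (n+1) d x = (d, x) := by simp [findLoop, hgd]
      rw [hfl]
      exact ⟨rfl, rfl, fun y r' q' hq' hnd' => ⟨q', hq', hnd', fun z hz => hz⟩⟩
    | step _ y2 _ p hy2 hne hp2 =>
      have hgd : d.getD x 0 = y2 := PySem.Dict.getD_of_get?_eq_some d 0 hy2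
      obtain ⟨g, hg⟩ := ufpath_head_lookup hp2
      have hgd2 : d.getD y2 0 = g := PySem.Dict.getD_of_get?_eq_some d 0 hg
      have hne' : y2 ≠ x := Ne.symm hne
      have hcomp := ufpath_compress hy2 hne' hg
      have hxkeys : x ∈ d.keys := by
        have : ¬ d.get? x = none := by simp [hy2]
        rw [PySem.Dict.get?_eq_none_iff_not_mem_keys] at this
        exact not_not.mp this
      have hkeys' : (d.insert x g).keys = d.keys :=
        PySem.Dict.keys_insert_of_contains d g ((PySem.Dict.contains_iff_mem_keys d x).mpr hxkeys)
      have hndq := List.nodup_cons.mp hnd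
      obtain ⟨pg, hpg, hpgnd, hpgsub, hpglen⟩ := ufpath_next hp2 hg hndq.2
      obtain ⟨qg, hqg, hqgnd, hqgsub⟩ := hcomp pg.length g r pg (le_refl _) hpg hpgnd
      have hlg : qg.length ≤ n := by
        have h2 := (hqgnd.subperm hqgsub).length_le
        simp at hlen; omega
      obtain ⟨hr1, hk1, htr1⟩ := ih (d.insert x g) g r qg hqg hqgnd hlg
      refine ⟨?_, ?_, ?_⟩
      · simp only [findLoop, hgd, hgd2, if_pos hne']; exact hr1
      · simp only [findLoop, hgd, hgd2, if_pos hne']; rw [hk1, hkeys']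
      · intro y r' q' hq' hnd'
        obtain ⟨q1, hq1, hq1nd, hq1sub⟩ := hcomp (q'.length) y r' q' (le_refl _) hq' hnd'
        obtain ⟨q2, hq2, hq2nd, hq2sub⟩ := htr1 y r' q1 hq1 hq1nd
        refine ⟨q2, ?_, hq2nd, fun z hz => hq1sub (hq2sub hz)⟩
        simpa only [findLoop, hgd, hgd2, if_pos hne'] using hq2

theorem findA_spec {par : PySem.Dict Int Int} {x r : Int} {q : List Int}
    (hp : UFPath par x r q) (hnd : q.Nodup) :
    (findA par x).2 = r ∧ (findA par x).1.keys = par.keys ∧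
    (∀ y r' q', UFPath par y r' q' → q'.Nodup →
      ∃ q'', UFPath (findA par x).1 y r' q'' ∧ q''.Nodup ∧ q'' ⊆ q') := by
  have hsub : q ⊆ par.keys := fun z hz => ufpath_mem_keys hp z hz
  have hlen : q.length ≤ par.items.length + 1 := by
    have h1 := (hnd.subperm hsub).length_le
    have h2 : par.keys.length = par.items.length := by
      simp only [PySem.Dict.keys]; exact List.length_map _
    omega
  exact findLoop_spec (par.items.length + 1) par x r q hp hnd hlen

theorem ufpath_link {d : PySem.Dict Int Int} {ra rb : Int}
    (hra : d.get? ra = some ra) (hrb : d.get? rb = some rb) (hne : ra ≠ rb) :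
    ∀ y r q, UFPath d y r q → q.Nodup →
      (r = rb → UFPath (d.insert rb ra) y ra (q ++ [ra]) ∧ (q ++ [ra]).Nodup) ∧
      (r ≠ rb → UFPath (d.insert rb ra) y r q) := by
  intro y r q hp
  induction hp with
  | root s hs =>
    intro hnd
    constructor
    · intro hrbeq; subst hrbeq
      refine ⟨UFPath.step _ _ _ _ (PySem.Dict.get?_insert_self d s ra) (Ne.symm hne) ?_, ?_⟩
      · exact UFPath.root _ (by rw [PySem.Dict.get?_insert_of_ne d ra hne]; exact hra)
      · simp [Ne.symm hne]
    · intro hrne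
      exact UFPath.root _ (by rw [PySem.Dict.get?_insert_of_ne d ra hrne]; exact hs)
  | step x y2 r p hxy hne2 hp2 ih =>
    intro hnd
    have hxrb : x ≠ rb := by
      intro hcon; subst hcon
      rw [hrb] at hxy; cases hxy; exact absurd rfl hne2
    have hxra : x ≠ ra := by
      intro hcon; subst hcon
      rw [hra] at hxy; cases hxy; exact absurd rfl hne2
    have hndc := List.nodup_cons.mp hnd
    constructor
    · intro hrbeq
      obtain ⟨hpa, hnda⟩ := (ih hndc.2).1 hrbeq
      refine ⟨?_, ?_⟩
      · exact UFPath.step _ _ _ _ (by rw [PySem.Dict.get?_insert_of_ne d ra hxrb]; exact hxy) hne2 hpa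
      · rw [List.cons_append]
        refine List.nodup_cons.mpr ⟨?_, hnda⟩
        intro hmem
        rcases List.mem_append.mp hmem with h1 | h1
        · exact hndc.1 h1
        · exact hxra (List.mem_singleton.mp h1)
    · intro hrne
      exact UFPath.step _ _ _ _ (by rw [PySem.Dict.get?_insert_of_ne d ra hxrb]; exact hxy) hne2
        ((ih hndc.2).2 hrne)

theorem relabel_get? (rt : PySem.Dict Int Int) (ra rb x : Int) :
    (relabel rt ra rb).get? x = (rt.get? x).map (fun v => if v = rb then ra else v) := by
  cases rt with
  | mk l =>
    induction l with
    | nil => simp [relabel, PySem.Dict.get?]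
    | cons p rest ih =>
      obtain ⟨k, v⟩ := p
      simp only [relabel] at ih ⊢
      rw [List.map_cons, PySem.Dict.get?_mk_cons, PySem.Dict.get?_mk_cons]
      by_cases hk : (k == x) = true
      · simp [hk]
      · simp only [hk]; exact ih

theorem relabel_keys (rt : PySem.Dict Int Int) (ra rb : Int) :
    (relabel rt ra rb).keys = rt.keys := by
  cases rt with
  | mk l => simp [relabel, PySem.Dict.keys]

def InvK (K : List Int) (par rt : PySem.Dict Int Int) : Prop :=
  par.keys = K ∧ rt.keys = K ∧
  ∀ x ∈ K, ∃ r q, rt.get? x = some r ∧ UFPath par x r q ∧ q.Nodup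

theorem unionA_invk {K : List Int} {par rt : PySem.Dict Int Int} {ei ej : Int}
    (h : InvK K par rt) (hei : ei ∈ K) (hej : ej ∈ K) :
    InvK K (unionA par ei ej)
      (if rt.getD ei 0 ≠ rt.getD ej 0 then relabel rt (rt.getD ei 0) (rt.getD ej 0) else rt) := by
  obtain ⟨hkp, hkr, hall⟩ := h
  obtain ⟨ra, qa, hrta, hpa, hnda⟩ := hall ei hei
  obtain ⟨rb, qb, hrtb, hpb, hndb⟩ := hall ej hej
  have hgda : rt.getD ei 0 = ra := PySem.Dict.getD_of_get?_eq_some rt 0 hrta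
  have hgdb : rt.getD ej 0 = rb := PySem.Dict.getD_of_get?_eq_some rt 0 hrtb
  -- first find
  obtain ⟨hfa, hka, hta⟩ := findA_spec hpa hnda
  set d1 := (findA par ei).1 with hd1
  -- path of ej in d1
  obtain ⟨qb1, hpb1, hndb1, _⟩ := hta ej rb qb hpb hndb
  obtain ⟨hfb, hkb, htb⟩ := findA_spec hpb1 hndb1
  set d2 := (findA d1 ej).1 with hd2
  have hkeys2 : d2.keys = K := by rw [hkb, hka, hkp]
  -- fixpoint facts in d2
  have hfixa : d2.get? ra = some ra := by
    have h0 : UFPath par ra ra [ra] := UFPath.root ra (ufpath_last hpa)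
    obtain ⟨q1, hq1, hnd1, _⟩ := hta ra ra [ra] h0 (List.nodup_singleton _)
    obtain ⟨q2, hq2, _, _⟩ := htb ra ra q1 hq1 hnd1
    exact ufpath_last hq2
  have hfixb : d2.get? rb = some rb := by
    have h0 : UFPath par rb rb [rb] := UFPath.root rb (ufpath_last hpb)
    obtain ⟨q1, hq1, hnd1, _⟩ := hta rb rb [rb] h0 (List.nodup_singleton _)
    obtain ⟨q2, hq2, _, _⟩ := htb rb rb q1 hq1 hnd1
    exact ufpath_last hq2
  have hU : unionA par ei ej = if ra ≠ rb then d2.insert rb ra else d2 := by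
    simp only [unionA, ← hd1, ← hd2, hfa, hfb]
  by_cases hrarb : ra = rb
  · subst hrarb
    rw [hgda, hgdb, hU]
    simp only [ne_eq, not_true_eq_false, if_false]
    refine ⟨hkeys2, hkr, ?_⟩
    intro x hxK
    obtain ⟨r, q, hrt, hp, hnd⟩ := hall x hxK
    obtain ⟨q1, hq1, hnd1, _⟩ := hta x r q hp hnd
    obtain ⟨q2, hq2, hnd2, _⟩ := htb x r q1 hq1 hnd1
    exact ⟨r, q2, hrt, hq2, hnd2⟩
  · rw [hgda, hgdb, hU, if_pos hrarb, if_pos hrarb]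
    refine ⟨?_, ?_, ?_⟩
    · rw [PySem.Dict.keys_insert_of_contains d2 ra ?_, hkeys2]
      rw [PySem.Dict.contains_eq_isSome_get?, hfixb]
      rfl
    · rw [relabel_keys, hkr]
    · intro x hxK
      obtain ⟨r, q, hrt, hp, hnd⟩ := hall x hxK
      obtain ⟨q1, hq1, hnd1, _⟩ := hta x r q hp hnd
      obtain ⟨q2, hq2, hnd2, _⟩ := htb x r q1 hq1 hnd1
      have hlink := ufpath_link hfixa hfixb hrarb x r q2 hq2 hnd2
      by_cases hrrb : r = rb
      · obtain ⟨hp', hnd'⟩ := hlink.1 hrrb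
        refine ⟨ra, q2 ++ [ra], ?_, hp', hnd'⟩
        rw [relabel_get?, hrt]
        simp [hrrb]
      · refine ⟨r, q2, ?_, hlink.2 hrrb, hnd2⟩
        rw [relabel_get?, hrt]
        simp [hrrb]

theorem foldl_rel {α σA σB : Type} (R : σA → σB → Prop) (l : List α)
    (fA : σA → α → σA) (fB : σB → α → σB)
    (h : ∀ a ∈ l, ∀ sa sb, R sa sb → R (fA sa a) (fB sb a)) :
    ∀ sa sb, R sa sb → R (l.foldl fA sa) (l.foldl fB sb) := by
  induction l with
  | nil => intro sa sb hR; exact hR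
  | cons a l ih =>
    intro sa sb hR
    exact ih (fun b hb => h b (List.mem_cons_of_mem _ hb)) _ _ (h a List.mem_cons_self sa sb hR)

theorem foldl_insert_self_get? {α : Type} (key : α → Int) (l : List α) :
    ∀ (d : PySem.Dict Int Int), (∀ x v, d.get? x = some v → v = x) →
    ∀ x v, (l.foldl (fun d a => d.insert (key a) (key a)) d).get? x = some v → v = x := by
  induction l with
  | nil => intro d hd; exact hd
  | cons a l ih =>
    intro d hd
    refine ih _ ?_
    intro x v hx
    rw [PySem.Dict.get?_insert] at hx
    by_cases hk : x = key a
    · rw [if_pos hk] at hx; cases hx; exact hk.symm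
    · rw [if_neg hk] at hx; exact hd x v hx

theorem init_invk (items : List (Int × String)) :
    InvK (items.foldl (fun d (p : Int × String) => d.insert p.1 p.1) PySem.Dict.empty).keys
      (items.foldl (fun d p => d.insert p.1 p.1) PySem.Dict.empty)
      (items.foldl (fun d p => d.insert p.1 p.1) PySem.Dict.empty) := by
  refine ⟨rfl, rfl, ?_⟩
  intro x hx
  set d0 := items.foldl (fun d (p : Int × String) => d.insert p.1 p.1) PySem.Dict.empty with hd0
  have hsel := foldl_insert_self_get? (fun p : Int × String => p.1) items PySem.Dict.empty
    (by intro x v hx; rw [PySem.Dict.get?_empty] at hx; cases hx)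
  obtain ⟨v, hv⟩ : ∃ v, d0.get? x = some v := by
    rcases ho : d0.get? x with _ | v
    · rw [PySem.Dict.get?_eq_none_iff_not_mem_keys] at ho; exact absurd hx ho
    · exact ⟨v, rfl⟩
  have hvx : v = x := hsel x v hv
  subst hvx
  exact ⟨v, [v], hv, UFPath.root v hv, List.nodup_singleton _⟩

theorem init_mem_keys (items : List (Int × String)) :
    ∀ p ∈ items, p.1 ∈ (items.foldl (fun d (p : Int × String) => d.insert p.1 p.1) PySem.Dict.empty).keys := by
  intro p hp
  rw [PySem.Dict.keys_foldl_insert_key items (fun p : Int × String => p.1) (fun _ p => p.1)]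
  rw [PySem.Dict.keys_empty, PySem.Set.update_nil_left, PySem.Set.mem_ofList]
  exact List.mem_map_of_mem hp

theorem pair_step {K : List Int} {threshold : Int} {ei ej : Int} {hi hj : String}
    {par rt : PySem.Dict Int Int} (h : InvK K par rt) (heiK : ei ∈ K) (hejK : ej ∈ K) :
    InvK K
      (if hi ≠ "" ∧ hj ≠ "" ∧ hammingA hi hj ≤ threshold then unionA par ei ej else par)
      (if (decide (hi ≠ "") && decide (hj ≠ "")) = true then
        (if distB (if hi ≠ "" then hexToBits? hi else none) (if hj ≠ "" then hexToBits? hj else none) ≤ threshold then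
          (if rt.getD ei 0 ≠ rt.getD ej 0 then relabel rt (rt.getD ei 0) (rt.getD ej 0) else rt)
        else rt)
      else rt) := by
  by_cases h1 : hi ≠ ""
  · by_cases h2 : hj ≠ ""
    · have hd : distB (if hi ≠ "" then hexToBits? hi else none) (if hj ≠ "" then hexToBits? hj else none)
          = hammingA hi hj := by
        rw [if_pos h1, if_pos h2]; rfl
      have hb : (decide (hi ≠ "") && decide (hj ≠ "")) = true := by simp [h1, h2]
      rw [if_pos hb, hd]
      by_cases h3 : hammingA hi hj ≤ threshold
      · rw [if_pos h3, if_pos (show hi ≠ "" ∧ hj ≠ "" ∧ hammingA hi hj ≤ threshold from ⟨h1, h2, h3⟩)]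
        exact unionA_invk h heiK hejK
      · rw [if_neg h3, if_neg (show ¬(hi ≠ "" ∧ hj ≠ "" ∧ hammingA hi hj ≤ threshold) from
          fun hc => h3 hc.2.2)]
        exact h
    · rw [if_neg (show ¬((decide (hi ≠ "") && decide (hj ≠ "")) = true) from by simp [h2]),
        if_neg (show ¬(hi ≠ "" ∧ hj ≠ "" ∧ hammingA hi hj ≤ threshold) from fun hc => h2 hc.2.1)]
      exact h
  · rw [if_neg (show ¬((decide (hi ≠ "") && decide (hj ≠ "")) = true) from by simp [h1]),
      if_neg (show ¬(hi ≠ "" ∧ hj ≠ "" ∧ hammingA hi hj ≤ threshold) from fun hc => h1 hc.1)]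
    exact h

theorem double_fold_invk (items : List (Int × String)) (threshold : Int) (K : List Int)
    (hK : ∀ p ∈ items, p.1 ∈ K) (par rt : PySem.Dict Int Int) (h : InvK K par rt) :
    InvK K
      ((PySem.List.pyRange 0 (PySem.List.len items) 1).foldl (fun d i =>
        (PySem.List.pyRange (i+1) (PySem.List.len items) 1).foldl (fun d j =>
          match PySem.List.pyGet? items i, PySem.List.pyGet? items j with
          | some (ei, hi), some (ej, hj) =>
            if hi ≠ "" ∧ hj ≠ "" ∧ hammingA hi hj ≤ threshold then unionA d ei ej else d
          | _, _ => d) d) par)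
      ((PySem.List.pyRange 0 (PySem.List.len items) 1).foldl (fun d i =>
        match PySem.List.pyGet? (items.map (fun p => (p.1, decide (p.2 ≠ ""), if p.2 ≠ "" then hexToBits? p.2 else none))) i with
        | some (ei, bi, pi) =>
          (PySem.List.pyRange (i+1) (PySem.List.len items) 1).foldl (fun d j =>
            match PySem.List.pyGet? (items.map (fun p => (p.1, decide (p.2 ≠ ""), if p.2 ≠ "" then hexToBits? p.2 else none))) j with
            | some (ej, bj, pj) =>
              if bi && bj then
                if distB pi pj ≤ threshold then
                  let ra := d.getD ei 0
                  let rb := d.getD ej 0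
                  if ra ≠ rb then relabel d ra rb else d
                else d
              else d
            | none => d) d
        | none => d) rt) := by
  apply foldl_rel (R := InvK K) _ _ _ ?_ par rt h
  intro i hiR sa sb hR
  obtain ⟨hi0, hilt⟩ := PySem.List.mem_pyRange_one.mp hiR
  have hlen : PySem.List.len items = (items.length : Int) := PySem.List.len_eq items
  have hitoNat : i.toNat < items.length := by rw [hlen] at hilt; omega
  rcases hp : items[i.toNat] with ⟨ei, si⟩
  have hgetiA : PySem.List.pyGet? items i = some (ei, si) := by
    rw [PySem.List.pyGet?_of_nonneg items hi0, List.getElem?_eq_getElem hitoNat, hp]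
  have hgetiB : PySem.List.pyGet?
      (items.map (fun p => (p.1, decide (p.2 ≠ ""), if p.2 ≠ "" then hexToBits? p.2 else none))) i
      = some (ei, decide (si ≠ ""), if si ≠ "" then hexToBits? si else none) := by
    rw [PySem.List.pyGet?_of_nonneg _ hi0, List.getElem?_map,
      List.getElem?_eq_getElem hitoNat, hp]
    rfl
  have heiK : ei ∈ K := by
    have hm : (ei, si) ∈ items := by rw [← hp]; exact List.getElem_mem hitoNat
    exact hK _ hm
  simp only [hgetiB]
  apply foldl_rel (R := InvK K) _ _ _ ?_ sa sb hR
  intro j hjR sa' sb' hR'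
  obtain ⟨hj0', hjlt⟩ := PySem.List.mem_pyRange_one.mp hjR
  have hj0 : (0:Int) ≤ j := by omega
  have hjtoNat : j.toNat < items.length := by rw [hlen] at hjlt; omega
  rcases hq : items[j.toNat] with ⟨ej, sj⟩
  have hgetjA : PySem.List.pyGet? items j = some (ej, sj) := by
    rw [PySem.List.pyGet?_of_nonneg items hj0, List.getElem?_eq_getElem hjtoNat, hq]
  have hgetjB : PySem.List.pyGet?
      (items.map (fun p => (p.1, decide (p.2 ≠ ""), if p.2 ≠ "" then hexToBits? p.2 else none))) j
      = some (ej, decide (sj ≠ ""), if sj ≠ "" then hexToBits? sj else none) := by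
    rw [PySem.List.pyGet?_of_nonneg _ hj0, List.getElem?_map,
      List.getElem?_eq_getElem hjtoNat, hq]
    rfl
  have hejK : ej ∈ K := by
    have hm : (ej, sj) ∈ items := by rw [← hq]; exact List.getElem_mem hjtoNat
    exact hK _ hm
  simp only [hgetiA, hgetjA, hgetjB]
  exact pair_step hR' heiK hejK

theorem label_loop (K : List Int) (rt : PySem.Dict Int Int) :
    ∀ (l : List (Int × String)), (∀ p ∈ l, p.1 ∈ K) →
    ∀ (par roots : PySem.Dict Int Int) (nid : Int) (out : PySem.Dict Int Int),
    InvK K par rt →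
    (l.foldl (fun (s : PySem.Dict Int Int × PySem.Dict Int Int × Int × PySem.Dict Int Int) p =>
        let f := findA s.1 p.1
        let roots' := if s.2.1.contains f.2 then s.2.1 else s.2.1.insert f.2 s.2.2.1
        let nid' := if s.2.1.contains f.2 then s.2.2.1 else s.2.2.1 + 1
        (f.1, roots', nid', s.2.2.2.insert p.1 (roots'.getD f.2 0)))
      (par, roots, nid, out)).2 =
    l.foldl (fun (s : PySem.Dict Int Int × Int × PySem.Dict Int Int) p =>
        let r := rt.getD p.1 0
        let label' := if s.1.contains r then s.1 else s.1.insert r s.2.1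
        let nid' := if s.1.contains r then s.2.1 else s.2.1 + 1
        (label', nid', s.2.2.insert p.1 (label'.getD r 0)))
      (roots, nid, out) := by
  intro l
  induction l with
  | nil => intro _ par roots nid out _; rfl
  | cons p l ih =>
    intro hmem par roots nid out h
    obtain ⟨r, q, hrt, hp, hnd⟩ := h.2.2 p.1 (hmem p List.mem_cons_self)
    obtain ⟨hfr, hfk, htr⟩ := findA_spec hp hnd
    have hgd : rt.getD p.1 0 = r := PySem.Dict.getD_of_get?_eq_some rt 0 hrt
    have hInv' : InvK K (findA par p.1).1 rt := by
      refine ⟨by rw [hfk]; exact h.1, h.2.1, ?_⟩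
      intro x hx
      obtain ⟨r', q', hrt', hp', hnd'⟩ := h.2.2 x hx
      obtain ⟨q'', hq'', hnd'', _⟩ := htr x r' q' hp' hnd'
      exact ⟨r', q'', hrt', hq'', hnd''⟩
    simp only [List.foldl_cons, hfr, hgd]
    exact ih (fun b hb => hmem b (List.mem_cons_of_mem _ hb)) _ _ _ _ hInv'

theorem ports_eq (items : List (Int × String)) (threshold : Int) :
    cluster_phashes items threshold = cluster_phashes_alt items threshold := by
  unfold cluster_phashes cluster_phashes_alt
  have hfoldmap : (items.map (fun p : Int × String =>
        (p.1, decide (p.2 ≠ ""), if p.2 ≠ "" then hexToBits? p.2 else none))).foldl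
        (fun d t => d.insert t.1 t.1) PySem.Dict.empty
      = items.foldl (fun d (p : Int × String) => d.insert p.1 p.1) PySem.Dict.empty := by
    rw [List.foldl_map]
  have hlenmap : PySem.List.len (items.map (fun p : Int × String =>
        (p.1, decide (p.2 ≠ ""), if p.2 ≠ "" then hexToBits? p.2 else none)))
      = PySem.List.len items := by
    simp [PySem.List.len_eq]
  simp only [hfoldmap, hlenmap]
  have h0 := init_invk items
  have hK := init_mem_keys items
  have hInv := double_fold_invk items threshold _ hK _ _ h0
  have hlab := label_loop _ _ items hK _ PySem.Dict.empty 1 PySem.Dict.empty hInv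
  rw [hlab]

-- ===== VERDICT (by name: the statement is the Claim_ definition above) =====
theorem cluster_phashes_spec : Claim_equal_cluster_phashes := by
  intro items threshold _
  unfold Spec_cluster_phashes
  exact ports_eq items threshold
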